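-- pv_equiv track=rewrite | github.com/Lt-kang/Coding_test | 백준/Gold/1759. 암호 만들기/암호 만들기.py | check
-- ===== SOURCE A (Python) =====
-- def check(str):
--     temp = list(str)
--     cnt = 0
--     check_list = ['a','e','i','o','u']
--     for i in check_list:
--         t = temp.count(i)
--         cnt += t
--
--     if cnt>=1 and len(str)-2 >= cnt:
--         return True
--     else: return False
-- ===== SOURCE B (Python) =====
-- def check(str):
--     cnt = 0
--     for c in str:
--         if c in 'aeiou':
--             cnt += 1
--     return cnt >= 1 and len(str) - 2 >= cnt
-- ===== Notes on version B (the rewrite author's own statement) =====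
-- stated objective: simpler
-- what changed: Replaces A's five separate list.count scans (one per vowel) by a single pass over the string counting vowel characters, and returns the comparison directly instead of an if/else returning True/False.
import Mathlib
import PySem

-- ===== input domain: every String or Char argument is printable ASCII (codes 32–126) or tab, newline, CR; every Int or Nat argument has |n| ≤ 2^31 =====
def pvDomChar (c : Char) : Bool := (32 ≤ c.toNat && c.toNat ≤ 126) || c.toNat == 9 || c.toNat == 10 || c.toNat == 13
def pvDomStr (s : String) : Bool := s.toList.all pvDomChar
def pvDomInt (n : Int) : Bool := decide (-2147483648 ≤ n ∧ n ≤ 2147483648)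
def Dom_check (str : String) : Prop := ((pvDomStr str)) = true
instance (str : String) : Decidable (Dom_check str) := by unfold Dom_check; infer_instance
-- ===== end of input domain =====

-- B replaces A's five per-vowel list.count scans by one pass counting vowel characters (simpler).

-- ===== PORT A =====
def check (str : String) : Bool :=
  let temp := str.toList
  let cnt : Int :=
    ['a','e','i','o','u'].foldl (fun cnt i => cnt + (PySem.List.count temp i : Int)) 0
  if cnt ≥ 1 ∧ PySem.Str.len str - 2 ≥ cnt then true else false

-- ===== PORT B =====
def check_alt (str : String) : Bool :=
  let cnt : Int :=
    str.toList.foldl (fun cnt c => if ("aeiou".toList).contains c then cnt + 1 else cnt) 0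
  decide (cnt ≥ 1 ∧ PySem.Str.len str - 2 ≥ cnt)

-- ===== PRECONDITION & SPEC =====
def Spec_check (str : String) (out : Bool) : Prop := out = check_alt str
instance (str : String) (out : Bool) : Decidable (Spec_check str out) := by unfold Spec_check; infer_instance

-- ===== CLAIM (what is proved, stated in full; the proofs are below) =====
def Claim_equal_check : Prop := ∀ (str : String), Dom_check str → Spec_check str (check str)

-- ===== LEMMAS AND PROOFS =====
theorem foldl_vowels (l : List Char) (a : Int) :
    l.foldl (fun cnt c => if ("aeiou".toList).contains c then cnt + 1 else cnt) a
      = a + l.count 'a' + l.count 'e' + l.count 'i' + l.count 'o' + l.count 'u' := by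
  induction l generalizing a with
  | nil => simp
  | cons c t ih =>
    simp only [List.foldl_cons, ih, List.count_cons]
    by_cases h : ("aeiou".toList).contains c = true
    · rw [if_pos h]
      have hm : c = 'a' ∨ c = 'e' ∨ c = 'i' ∨ c = 'o' ∨ c = 'u' := by
        have := h; simp [List.contains_eq_mem] at this; simpa using this
      rcases hm with rfl | rfl | rfl | rfl | rfl <;> simp <;> ring
    · have ha : (c == 'a') = false := by simp; rintro rfl; exact h (by decide)
      have he : (c == 'e') = false := by simp; rintro rfl; exact h (by decide)
      have hi : (c == 'i') = false := by simp; rintro rfl; exact h (by decide)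
      have ho : (c == 'o') = false := by simp; rintro rfl; exact h (by decide)
      have hu : (c == 'u') = false := by simp; rintro rfl; exact h (by decide)
      rw [if_neg h, ha, he, hi, ho, hu]
      simp

-- ===== VERDICT (by name: the statement is the Claim_ definition above) =====
theorem check_spec : Claim_equal_check := by
  intro str _
  unfold Spec_check check check_alt
  simp only [List.foldl, PySem.List.count_eq, foldl_vowels]
  split_ifs with h
  · obtain ⟨h1, h2⟩ := h
    exact (decide_eq_true (by constructor <;> omega)).symm
  · symm
    rw [decide_eq_false_iff_not]
    intro hq
    obtain ⟨h1, h2⟩ := hq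
    exact h ⟨by omega, by omega⟩
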